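-- pv_equiv track=rewrite | github.com/ariel-ortiz/202413-tc2038.602 | 9. Backtracking/word_break.py | periodic_table_words
-- ===== SOURCE A (Python) =====
-- elements = {
--     'h', 'he', 'li', 'be', 'b', 'c', 'n', 'o', 'f', 'ne', 'na',
--     'mg', 'al', 'si', 'p', 's', 'cl', 'ar', 'k', 'ca', 'sc', 'ti',
--     'v', 'cr', 'mn', 'fe', 'co', 'ni', 'cu', 'zn', 'ga', 'ge',
--     'as', 'se', 'br', 'kr', 'rb', 'sr', 'y', 'zr', 'nb', 'mo',
--     'tc', 'ru', 'rh', 'pd', 'ag', 'cd', 'in', 'sn', 'sb', 'te',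
--     'i', 'xe', 'cs', 'ba', 'la', 'ce', 'pr', 'nd', 'pm', 'sm',
--     'eu', 'gd', 'tb', 'dy', 'ho', 'er', 'tm', 'yb', 'lu', 'hf',
--     'ta', 'w', 're', 'os', 'ir', 'pt', 'au', 'hg', 'tl', 'pb',
--     'bi', 'po', 'at', 'rn', 'fr', 'ra', 'ac', 'th', 'pa', 'u',
--     'np', 'pu', 'am', 'cm', 'bk', 'cf', 'es', 'fm', 'md', 'no',
--     'lr', 'rf', 'db', 'sg', 'bh', 'hs', 'mt', 'ds', 'rg', 'cn',
--     'nh', 'fl', 'mc', 'lv', 'ts', 'og'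
-- }
--
-- def find(s: str, words: set[str], answer: list[str] = []) -> list[str] | None:
--     if s == '':
--         return answer
--     index: int = 0
--     word: str = ''
--     while index < len(s):
--         word += s[index]
--         if word in words:
--             new_answer: list[str] | None = \
--                 find(s[index + 1:], words, answer + [word])
--             if new_answer is not None:
--                 return new_answer
--         index += 1
--     return None
--
-- def periodic_table_words(s: str) -> str | None:
--     result: list[str] = []
--     word: str
--     for word in s.split():
--         r: list[str] | None = find(word, elements)
--         if r is not None:
--             result.append('-'.join([x.capitalize() for x in r]))
--         else:
--             return None
--     return '  '.join(result)
-- ===== SOURCE B (Python) =====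
-- # B: linear DP over suffix solvability per word (symbols have length 1 or 2),
-- # then shortest-prefix-first reconstruction -- replaces A's exponential backtracking.
-- ELEMENTS = frozenset({
--     'h', 'he', 'li', 'be', 'b', 'c', 'n', 'o', 'f', 'ne', 'na',
--     'mg', 'al', 'si', 'p', 's', 'cl', 'ar', 'k', 'ca', 'sc', 'ti',
--     'v', 'cr', 'mn', 'fe', 'co', 'ni', 'cu', 'zn', 'ga', 'ge',
--     'as', 'se', 'br', 'kr', 'rb', 'sr', 'y', 'zr', 'nb', 'mo',
--     'tc', 'ru', 'rh', 'pd', 'ag', 'cd', 'in', 'sn', 'sb', 'te',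
--     'i', 'xe', 'cs', 'ba', 'la', 'ce', 'pr', 'nd', 'pm', 'sm',
--     'eu', 'gd', 'tb', 'dy', 'ho', 'er', 'tm', 'yb', 'lu', 'hf',
--     'ta', 'w', 're', 'os', 'ir', 'pt', 'au', 'hg', 'tl', 'pb',
--     'bi', 'po', 'at', 'rn', 'fr', 'ra', 'ac', 'th', 'pa', 'u',
--     'np', 'pu', 'am', 'cm', 'bk', 'cf', 'es', 'fm', 'md', 'no',
--     'lr', 'rf', 'db', 'sg', 'bh', 'hs', 'mt', 'ds', 'rg', 'cn',
--     'nh', 'fl', 'mc', 'lv', 'ts', 'og'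
-- })
--
-- def periodic_table_words(s: str) -> str | None:
--     out = []
--     for w in s.split():
--         n = len(w)
--         ok = [False] * (n + 1)
--         ok[n] = True
--         for i in range(n - 1, -1, -1):
--             ok[i] = (w[i] in ELEMENTS and ok[i + 1]) or \
--                     (w[i:i + 2] in ELEMENTS and i + 2 <= n and ok[i + 2])
--         if not ok[0]:
--             return None
--         parts = []
--         i = 0
--         while i < n:
--             if w[i] in ELEMENTS and ok[i + 1]:
--                 parts.append(w[i].upper())
--                 i += 1
--             else:
--                 parts.append(w[i].upper() + w[i + 1].lower())
--                 i += 2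
--         out.append('-'.join(parts))
--     return '  '.join(out)
-- ===== Notes on version B (the rewrite author's own statement) =====
-- stated objective: faster
-- what changed: Replaced A's exponential backtracking search per word with a linear right-to-left DP over suffix solvability (element symbols have length 1 or 2) plus a shortest-prefix-first reconstruction pass.
import Mathlib
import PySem

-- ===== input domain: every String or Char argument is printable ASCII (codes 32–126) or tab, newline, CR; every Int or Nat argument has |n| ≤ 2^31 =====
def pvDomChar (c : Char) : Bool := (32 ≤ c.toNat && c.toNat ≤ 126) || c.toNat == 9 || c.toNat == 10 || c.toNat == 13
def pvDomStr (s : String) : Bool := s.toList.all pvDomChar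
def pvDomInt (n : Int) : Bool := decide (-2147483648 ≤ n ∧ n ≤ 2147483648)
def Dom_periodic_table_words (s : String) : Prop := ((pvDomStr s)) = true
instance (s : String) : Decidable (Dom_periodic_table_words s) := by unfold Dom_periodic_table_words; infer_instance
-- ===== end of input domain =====

-- B replaces A's exponential backtracking per word by a linear DP over suffix
-- solvability (element symbols have length 1 or 2) with a shortest-prefix-first
-- reconstruction; return values agree everywhere.

-- ===== PORT A =====
-- the 'elements' set as A manipulates it: words compared char by char
def pvElems : List (List Char) := [
  ['h'], ['h', 'e'], ['l', 'i'], ['b', 'e'], ['b'], ['c'], ['n'], ['o'],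
  ['f'], ['n', 'e'], ['n', 'a'], ['m', 'g'], ['a', 'l'], ['s', 'i'], ['p'], ['s'],
  ['c', 'l'], ['a', 'r'], ['k'], ['c', 'a'], ['s', 'c'], ['t', 'i'], ['v'], ['c', 'r'],
  ['m', 'n'], ['f', 'e'], ['c', 'o'], ['n', 'i'], ['c', 'u'], ['z', 'n'], ['g', 'a'], ['g', 'e'],
  ['a', 's'], ['s', 'e'], ['b', 'r'], ['k', 'r'], ['r', 'b'], ['s', 'r'], ['y'], ['z', 'r'],
  ['n', 'b'], ['m', 'o'], ['t', 'c'], ['r', 'u'], ['r', 'h'], ['p', 'd'], ['a', 'g'], ['c', 'd'],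
  ['i', 'n'], ['s', 'n'], ['s', 'b'], ['t', 'e'], ['i'], ['x', 'e'], ['c', 's'], ['b', 'a'],
  ['l', 'a'], ['c', 'e'], ['p', 'r'], ['n', 'd'], ['p', 'm'], ['s', 'm'], ['e', 'u'], ['g', 'd'],
  ['t', 'b'], ['d', 'y'], ['h', 'o'], ['e', 'r'], ['t', 'm'], ['y', 'b'], ['l', 'u'], ['h', 'f'],
  ['t', 'a'], ['w'], ['r', 'e'], ['o', 's'], ['i', 'r'], ['p', 't'], ['a', 'u'], ['h', 'g'],
  ['t', 'l'], ['p', 'b'], ['b', 'i'], ['p', 'o'], ['a', 't'], ['r', 'n'], ['f', 'r'], ['r', 'a'],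
  ['a', 'c'], ['t', 'h'], ['p', 'a'], ['u'], ['n', 'p'], ['p', 'u'], ['a', 'm'], ['c', 'm'],
  ['b', 'k'], ['c', 'f'], ['e', 's'], ['f', 'm'], ['m', 'd'], ['n', 'o'], ['l', 'r'], ['r', 'f'],
  ['d', 'b'], ['s', 'g'], ['b', 'h'], ['h', 's'], ['m', 't'], ['d', 's'], ['r', 'g'], ['c', 'n'],
  ['n', 'h'], ['f', 'l'], ['m', 'c'], ['l', 'v'], ['t', 's'], ['o', 'g']]

-- str.capitalize (exact on ASCII): upper-case the first char, lower-case the rest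
def pvCap (cs : List Char) : List Char :=
  match cs with
  | [] => []
  | c :: r => PySem.Chars.upperChar c :: r.map PySem.Chars.lowerChar

-- 'find': the while loop (index/word) and the recursive call, transliterated
mutual
def pvFindLoop (s : List Char) (answer : List (List Char)) (index : Nat)
    (word : List Char) : Option (List (List Char)) :=
  if h : index < s.length then
    let word' := word ++ [s[index]]
    if pvElems.contains word' then
      match pvFindA (s.drop (index + 1)) (answer ++ [word']) with
      | some na => some na
      | none => pvFindLoop s answer (index + 1) word'
    else pvFindLoop s answer (index + 1) word'
  else none
termination_by (s.length, s.length - index)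
decreasing_by
  · exact Prod.Lex.left _ _ (by simp; omega)
  · exact Prod.Lex.right _ (by omega)
  · exact Prod.Lex.right _ (by omega)

def pvFindA (s : List Char) (answer : List (List Char)) : Option (List (List Char)) :=
  if s = [] then some answer else pvFindLoop s answer 0 []
termination_by (s.length, s.length + 1)
decreasing_by exact Prod.Lex.right _ (by omega)
end

-- the for-loop of periodic_table_words with early return None
def pvLoopA (ws : List String) (result : List (List Char)) : Option String :=
  match ws with
  | [] => some (String.ofList (PySem.Chars.join [' ', ' '] result))
  | w :: rest =>
    match pvFindA w.toList [] with
    | some r => pvLoopA rest (result ++ [PySem.Chars.join ['-'] (r.map pvCap)])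
    | none => none

def periodic_table_words (s : String) : Option String :=
  pvLoopA (PySem.Str.split₀ s) []

-- ===== PORT B =====
-- B keeps the symbol table as the plain strings of Source B's ELEMENTS
def pvSyms : List String := [
  "h", "he", "li", "be", "b", "c", "n", "o", "f", "ne", "na",
  "mg", "al", "si", "p", "s", "cl", "ar", "k", "ca", "sc", "ti",
  "v", "cr", "mn", "fe", "co", "ni", "cu", "zn", "ga", "ge",
  "as", "se", "br", "kr", "rb", "sr", "y", "zr", "nb", "mo",
  "tc", "ru", "rh", "pd", "ag", "cd", "in", "sn", "sb", "te",
  "i", "xe", "cs", "ba", "la", "ce", "pr", "nd", "pm", "sm",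
  "eu", "gd", "tb", "dy", "ho", "er", "tm", "yb", "lu", "hf",
  "ta", "w", "re", "os", "ir", "pt", "au", "hg", "tl", "pb",
  "bi", "po", "at", "rn", "fr", "ra", "ac", "th", "pa", "u",
  "np", "pu", "am", "cm", "bk", "cf", "es", "fm", "md", "no",
  "lr", "rf", "db", "sg", "bh", "hs", "mt", "ds", "rg", "cn",
  "nh", "fl", "mc", "lv", "ts", "og"]

-- membership test 'x in ELEMENTS' of Source B
def pvIsSym (t : List Char) : Bool := pvSyms.any (fun e => e.toList == t)

-- the DP array ok[i..n] for a word suffix, built right-to-left (head = ok[i])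
def pvOkList : List Char → List Bool
  | [] => [true]
  | c :: rest =>
    let t := pvOkList rest
    ((pvIsSym [c] && t.headD false) ||
      (match rest with
       | d :: _ => pvIsSym [c, d] && t.tail.headD false
       | [] => false)) :: t

-- the reconstruction walk: prefer the 1-char symbol when the rest stays solvable
def pvRebuild : List Char → List Bool → List (List Char)
  | [], _ => []
  | c :: rest, oks =>
    if pvIsSym [c] && oks.tail.headD false then
      [PySem.Chars.upperChar c] :: pvRebuild rest oks.tail
    else
      match rest with
      | d :: rest2 =>
        [PySem.Chars.upperChar c, PySem.Chars.lowerChar d] :: pvRebuild rest2 oks.tail.tail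
      | [] => []

def pvLoopB (ws : List String) (result : List (List Char)) : Option String :=
  match ws with
  | [] => some (String.ofList (PySem.Chars.join [' ', ' '] result))
  | w :: rest =>
    let oks := pvOkList w.toList
    if oks.headD false then
      pvLoopB rest (result ++ [PySem.Chars.join ['-'] (pvRebuild w.toList oks)])
    else none

def periodic_table_words_alt (s : String) : Option String :=
  pvLoopB (PySem.Str.split₀ s) []

-- ===== PRECONDITION & SPEC =====
def Spec_periodic_table_words (s : String) (out : Option String) : Prop := out = periodic_table_words_alt s
instance (s : String) (out : Option String) : Decidable (Spec_periodic_table_words s out) := by unfold Spec_periodic_table_words; infer_instance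

-- ===== CLAIM (what is proved, stated in full; the proofs are below) =====
def Claim_equal_periodic_table_words : Prop := ∀ (s : String), Dom_periodic_table_words s → Spec_periodic_table_words s (periodic_table_words s)

-- ===== LEMMAS AND PROOFS =====

-- proof-side abbreviations for membership in A's element set
def pvIsElem1 (c : Char) : Bool := pvElems.contains [c]
def pvIsElem2 (c d : Char) : Bool := pvElems.contains [c, d]

-- B's string-table membership agrees with A's char-list membership
lemma pvSyms_toList : pvSyms.map String.toList = pvElems := by decide

lemma pvIsSym_eq (t : List Char) : pvIsSym t = pvElems.contains t := by
  have h := List.any_map (l := pvSyms) (f := String.toList) (p := fun x => x == t)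
  rw [pvSyms_toList, List.any_beq'] at h
  rw [pvIsSym, h]
  rfl

lemma pvIsSym_one (c : Char) : pvIsSym [c] = pvIsElem1 c := pvIsSym_eq [c]
lemma pvIsSym_two (c d : Char) : pvIsSym [c, d] = pvIsElem2 c d := pvIsSym_eq [c, d]

-- canonical shortest-prefix-first segmentation (proof-side characterisation)
def pvSeg : List Char → Option (List (List Char))
  | [] => some []
  | [c] => if pvIsElem1 c then some [[c]] else none
  | c :: d :: rest2 =>
    match (if pvIsElem1 c then (pvSeg (d :: rest2)).map (([c]) :: ·) else none) with
    | some r => some r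
    | none => if pvIsElem2 c d then (pvSeg rest2).map (([c, d]) :: ·) else none

lemma pvElems_short : ∀ w ∈ pvElems, w.length ≤ 2 := by decide

lemma pvElems_not_contains_long (w : List Char) (h : 3 ≤ w.length) :
    pvElems.contains w = false := by
  cases hc : pvElems.contains w with
  | false => rfl
  | true =>
    have hmem : w ∈ pvElems := List.mem_of_elem_eq_true hc
    have := pvElems_short w hmem
    omega

-- the while loop returns None once the accumulated word has length ≥ 2
lemma pvFindLoop_dead (s : List Char) (answer : List (List Char)) :
    ∀ k index word, s.length - index ≤ k → 2 ≤ word.length →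
      pvFindLoop s answer index word = none := by
  intro k
  induction k with
  | zero =>
    intro index word hk _
    rw [pvFindLoop]
    rw [dif_neg (by omega)]
  | succ k ih =>
    intro index word hk hw
    rw [pvFindLoop]
    by_cases h : index < s.length
    · rw [dif_pos h]
      have hlong : pvElems.contains (word ++ [s[index]]) = false :=
        pvElems_not_contains_long _ (by simp; omega)
      simp only [hlong]
      exact ih (index + 1) _ (by omega) (by simp; omega)
    · rw [dif_neg h]

lemma pvFindA_eq : ∀ (n : Nat) (s : List Char), s.length ≤ n → ∀ answer,
    pvFindA s answer = (pvSeg s).map (answer ++ ·) := by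
  intro n
  induction n with
  | zero =>
    intro s hs answer
    have : s = [] := List.length_eq_zero_iff.mp (by omega)
    subst this
    rw [pvFindA]
    simp [pvSeg]
  | succ n ih =>
    intro s hs answer
    match s with
    | [] => rw [pvFindA]; simp [pvSeg]
    | c :: rest =>
      rw [pvFindA]
      rw [if_neg (by simp)]
      rw [pvFindLoop]
      rw [dif_pos (by simp)]
      simp only [List.nil_append, List.getElem_cons_zero, List.drop_succ_cons,
        List.drop_zero, Nat.zero_add]
      by_cases h1 : pvIsElem1 c
      · -- 1-char prefix is an element
        rw [if_pos (show pvElems.contains [c] = true from h1)]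
        rw [ih rest (by simp at hs; omega) _]
        cases hrest : pvSeg rest with
        | some p =>
          simp only [Option.map_some]
          match rest with
          | [] =>
            simp [pvSeg] at hrest
            subst hrest
            simp [pvSeg, h1]
          | d :: rest2 =>
            simp [pvSeg, h1, hrest]
        | none =>
          simp only [Option.map_none]
          -- continue the loop at index 1 with word = [c]
          match rest with
          | [] => simp [pvSeg] at hrest
          | d :: rest2 =>
            rw [pvFindLoop]
            rw [dif_pos (by simp)]
            simp only [List.getElem_cons_succ, List.getElem_cons_zero,
              List.singleton_append, Nat.reduceAdd, List.drop_succ_cons, List.drop_zero]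
            by_cases h2 : pvIsElem2 c d
            · rw [if_pos (show pvElems.contains [c, d] = true from h2)]
              rw [ih rest2 (by simp at hs ⊢; omega) _]
              cases hr2 : pvSeg rest2 with
              | some p2 =>
                simp [pvSeg, h1, h2, hrest, hr2]
              | none =>
                simp only [Option.map_none]
                rw [pvFindLoop_dead (c :: d :: rest2) answer
                  ((c :: d :: rest2).length) 2 [c, d] (by omega) (by simp)]
                simp [pvSeg, h1, h2, hrest, hr2]
            · rw [if_neg (show ¬ pvElems.contains [c, d] = true from h2)]
              rw [pvFindLoop_dead (c :: d :: rest2) answer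
                ((c :: d :: rest2).length) 2 [c, d] (by omega) (by simp)]
              simp [pvSeg, h1, h2, hrest]
      · -- 1-char prefix not an element
        rw [if_neg (show ¬ pvElems.contains [c] = true from h1)]
        match rest with
        | [] =>
          rw [pvFindLoop]
          rw [dif_neg (by simp)]
          simp [pvSeg, h1]
        | d :: rest2 =>
          rw [pvFindLoop]
          rw [dif_pos (by simp)]
          simp only [List.getElem_cons_succ, List.getElem_cons_zero,
            List.singleton_append, Nat.reduceAdd, List.drop_succ_cons, List.drop_zero]
          by_cases h2 : pvIsElem2 c d
          · rw [if_pos (show pvElems.contains [c, d] = true from h2)]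
            rw [ih rest2 (by simp at hs ⊢; omega) _]
            cases hr2 : pvSeg rest2 with
            | some p2 =>
              simp [pvSeg, h1, h2, hr2]
            | none =>
              simp only [Option.map_none]
              rw [pvFindLoop_dead (c :: d :: rest2) answer
                ((c :: d :: rest2).length) 2 [c, d] (by omega) (by simp)]
              simp [pvSeg, h1, h2, hr2]
          · rw [if_neg (show ¬ pvElems.contains [c, d] = true from h2)]
            rw [pvFindLoop_dead (c :: d :: rest2) answer
              ((c :: d :: rest2).length) 2 [c, d] (by omega) (by simp)]
            simp [pvSeg, h1, h2]

lemma pvOkList_cons_tail (c : Char) (r : List Char) :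
    (pvOkList (c :: r)).tail = pvOkList r := by
  simp [pvOkList]

lemma pvOkList_cons2 (c d : Char) (r : List Char) :
    pvOkList (c :: d :: r) =
      ((pvIsElem1 c && (pvOkList (d :: r)).headD false) ||
        (pvIsElem2 c d && (pvOkList (d :: r)).tail.headD false)) :: pvOkList (d :: r) := by
  rw [pvOkList]
  simp [pvIsSym_one, pvIsSym_two]

-- head of the DP array = solvability of the suffix
lemma pvOkList_head : ∀ s : List Char, (pvOkList s).headD false = (pvSeg s).isSome := by
  intro s
  induction s using pvSeg.induct with
  | case1 => simp [pvOkList, pvSeg]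
  | case2 c h1 => simp [pvOkList, pvSeg, h1, pvIsSym_one]
  | case3 c h1 => simp [pvOkList, pvSeg, h1, pvIsSym_one]
  | case4 c d rest2 na hif ih =>
    have h1 : pvIsElem1 c = true := by
      by_contra h
      rw [if_neg h] at hif
      simp at hif
    have hs1 : (pvSeg (d :: rest2)).isSome = true := by
      cases hm : pvSeg (d :: rest2) with
      | none => rw [if_pos h1, hm] at hif; simp at hif
      | some p => simp
    rw [pvOkList_cons2, List.headD_cons, pvOkList_cons_tail, ih, h1, hs1]
    simp [pvSeg, hif]
  | case5 c d rest2 hif h2 ih1 ih2 =>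
    have hfirst : (pvIsElem1 c && (pvSeg (d :: rest2)).isSome) = false := by
      by_cases h1 : pvIsElem1 c
      · rw [if_pos h1] at hif
        cases hm : pvSeg (d :: rest2) with
        | none => simp [h1]
        | some p => rw [hm] at hif; simp at hif
      · simp [h1]
    rw [pvOkList_cons2, List.headD_cons, pvOkList_cons_tail, ih1, ih2,
      show (pvIsElem1 c && (pvSeg (d :: rest2)).isSome) = false from hfirst, h2]
    simp [pvSeg, hif, h2]
  | case6 c d rest2 hif h2 ih1 =>
    have hfirst : (pvIsElem1 c && (pvSeg (d :: rest2)).isSome) = false := by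
      by_cases h1 : pvIsElem1 c
      · rw [if_pos h1] at hif
        cases hm : pvSeg (d :: rest2) with
        | none => simp [h1]
        | some p => rw [hm] at hif; simp at hif
      · simp [h1]
    rw [pvOkList_cons2, List.headD_cons, pvOkList_cons_tail, ih1,
      show (pvIsElem1 c && (pvSeg (d :: rest2)).isSome) = false from hfirst]
    simp [pvSeg, hif, h2]

-- the reconstruction walk produces the segmentation, capitalized
lemma pvRebuild_eq : ∀ s : List Char, ∀ p, pvSeg s = some p →
    pvRebuild s (pvOkList s) = p.map pvCap := by
  intro s
  induction s using pvSeg.induct with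
  | case1 =>
    intro p hp
    simp [pvSeg] at hp
    subst hp
    simp [pvRebuild]
  | case2 c h1 =>
    intro p hp
    simp [pvSeg, h1] at hp
    subst hp
    simp [pvRebuild, pvOkList, pvIsSym_one, h1, pvCap]
  | case3 c h1 =>
    intro p hp
    simp [pvSeg, h1] at hp
  | case4 c d rest2 na hif ih =>
    intro p hp
    have h1 : pvIsElem1 c = true := by
      by_contra h
      rw [if_neg h] at hif
      simp at hif
    obtain ⟨p1, hp1, hna⟩ : ∃ p1, pvSeg (d :: rest2) = some p1 ∧ na = [c] :: p1 := by
      rw [if_pos h1] at hif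
      cases hm : pvSeg (d :: rest2) with
      | none => rw [hm] at hif; simp at hif
      | some q => rw [hm] at hif; exact ⟨q, rfl, (Option.some.inj hif).symm⟩
    have hpna : p = na := by
      rw [pvSeg, hif] at hp
      exact (Option.some.inj hp).symm
    subst hpna hna
    rw [pvRebuild]
    rw [pvOkList_cons_tail, pvOkList_head, hp1, pvIsSym_one]
    simp only [h1, Option.isSome_some, Bool.and_true, if_true]
    rw [ih p1 hp1]
    simp [pvCap]
  | case5 c d rest2 hif h2 ih1 ih2 =>
    intro p hp
    have hfirst : (pvIsElem1 c && (pvSeg (d :: rest2)).isSome) = false := by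
      by_cases h1 : pvIsElem1 c
      · rw [if_pos h1] at hif
        cases hm : pvSeg (d :: rest2) with
        | none => simp [h1]
        | some q => rw [hm] at hif; simp at hif
      · simp [h1]
    obtain ⟨p2, hp2, hpp⟩ : ∃ p2, pvSeg rest2 = some p2 ∧ p = [c, d] :: p2 := by
      rw [pvSeg, hif, if_pos h2] at hp
      cases hm : pvSeg rest2 with
      | none => rw [hm] at hp; simp at hp
      | some q => rw [hm] at hp; exact ⟨q, rfl, (Option.some.inj hp).symm⟩
    subst hpp
    rw [pvRebuild]
    rw [pvOkList_cons_tail, pvOkList_head, pvIsSym_one]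
    rw [show (pvIsElem1 c && (pvSeg (d :: rest2)).isSome) = false from hfirst]
    simp only [if_false, Bool.false_eq_true]
    rw [pvOkList_cons_tail, ih2 p2 hp2]
    simp [pvCap]
  | case6 c d rest2 hif h2 ih1 =>
    intro p hp
    rw [pvSeg, hif, if_neg h2] at hp
    simp at hp

lemma pvLoop_eq : ∀ (ws : List String) (result : List (List Char)),
    pvLoopA ws result = pvLoopB ws result := by
  intro ws
  induction ws with
  | nil => intro result; rfl
  | cons w rest ih =>
    intro result
    rw [pvLoopA, pvLoopB]
    rw [pvFindA_eq w.toList.length w.toList (le_refl _) []]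
    rw [pvOkList_head]
    cases hseg : pvSeg w.toList with
    | some r =>
      simp only [Option.map_some, Option.isSome_some, if_true, List.nil_append]
      rw [pvRebuild_eq w.toList r hseg]
      exact ih _
    | none =>
      simp

-- ===== VERDICT (by name: the statement is the Claim_ definition above) =====
theorem periodic_table_words_spec : Claim_equal_periodic_table_words := by
  intro s _
  unfold Spec_periodic_table_words periodic_table_words periodic_table_words_alt
  exact pvLoop_eq _ _
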